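-- pv_equiv track=rewrite | github.com/CorvusVaine/analyzing_connected_papers_articles | compare_connected_papers.py | compute_force_and_links
-- ===== SOURCE A (Python) =====
-- def compute_force_and_links(L_edges):
--     D_force = {}
--     D_links = {}
--     for edge in L_edges:
--         if edge[1] in D_force.keys():
--             D_force[edge[1]]+=1
--             D_links[edge[1]].append((edge[0],edge[1]))
--         else :
--             D_force[edge[1]]=1
--             D_links[edge[1]]=[(edge[0],edge[1])]
--     return D_force,D_links
-- ===== SOURCE B (Python) =====
-- def compute_force_and_links(L_edges):
--     targets = []
--     for edge in L_edges:
--         if edge[1] not in targets: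
--             targets.append(edge[1])
--     D_force = {t: sum(1 for e in L_edges if e[1] == t) for t in targets}
--     D_links = {t: [(e[0], e[1]) for e in L_edges if e[1] == t] for t in targets}
--     return D_force, D_links
-- ===== Notes on version B (the rewrite author's own statement) =====
-- stated objective: alternative
-- what changed: B abandons the single-pass dual-dict grouping: it first collects the distinct targets in first-occurrence order, then for each target rescans L_edges to count and to collect its edges (per-key filter/count passes instead of incremental dict updates).
import Mathlib
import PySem

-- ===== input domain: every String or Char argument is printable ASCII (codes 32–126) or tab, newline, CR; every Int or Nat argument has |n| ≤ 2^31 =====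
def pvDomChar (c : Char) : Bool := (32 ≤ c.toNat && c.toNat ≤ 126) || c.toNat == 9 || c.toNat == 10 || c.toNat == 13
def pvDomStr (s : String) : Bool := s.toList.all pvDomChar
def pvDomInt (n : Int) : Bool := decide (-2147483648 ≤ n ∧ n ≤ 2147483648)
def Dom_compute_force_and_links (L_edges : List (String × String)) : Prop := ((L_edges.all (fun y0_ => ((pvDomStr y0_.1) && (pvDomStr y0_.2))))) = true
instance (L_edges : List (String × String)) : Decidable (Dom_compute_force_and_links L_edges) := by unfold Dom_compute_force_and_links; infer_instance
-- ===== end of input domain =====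

-- B replaces A's single-pass dual-dict grouping by per-distinct-target filter/count rescans (alternative algorithm; not faster).


-- ===== PORT A =====
-- loop body of A: update both dicts, branching on membership in D_force
def pvStepA (st : PySem.Dict String Int × PySem.Dict String (List (String × String)))
    (edge : String × String) :
    PySem.Dict String Int × PySem.Dict String (List (String × String)) :=
  if st.1.contains edge.2 then
    (st.1.insert edge.2 (st.1.getD edge.2 0 + 1),
     st.2.insert edge.2 (st.2.getD edge.2 [] ++ [(edge.1, edge.2)]))
  else
    (st.1.insert edge.2 1, st.2.insert edge.2 [(edge.1, edge.2)])

def compute_force_and_links (L_edges : List (String × String)) : (List (String × Int)) × (List (String × List (String × String))) :=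
  let st := L_edges.foldl pvStepA (PySem.Dict.empty, PySem.Dict.empty)
  (st.1.items, st.2.items)

-- ===== PORT B =====
-- first loop of B: collect the distinct targets in first-occurrence order
def pvTargets (L_edges : List (String × String)) : List String :=
  L_edges.foldl (fun acc edge => if acc.contains edge.2 then acc else acc ++ [edge.2]) []

def compute_force_and_links_alt (L_edges : List (String × String)) : (List (String × Int)) × (List (String × List (String × String))) :=
  let targets := pvTargets L_edges
  ((targets.map (fun t => (t, (L_edges.countP (fun e => e.2 == t) : Int)))),
   (targets.map (fun t => (t, L_edges.filter (fun e => e.2 == t)))))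

-- ===== PRECONDITION & SPEC =====
def Spec_compute_force_and_links (L_edges : List (String × String)) (out : (List (String × Int)) × (List (String × List (String × String)))) : Prop := out = compute_force_and_links_alt L_edges
instance (L_edges : List (String × String)) (out : (List (String × Int)) × (List (String × List (String × String)))) : Decidable (Spec_compute_force_and_links L_edges out) := by unfold Spec_compute_force_and_links; infer_instance

-- ===== CLAIM =====
def Claim_equal_compute_force_and_links : Prop := ∀ (L_edges : List (String × String)), Dom_compute_force_and_links L_edges → Spec_compute_force_and_links L_edges (compute_force_and_links L_edges)

-- ===== LEMMAS AND PROOFS =====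

lemma pvTargets_append (es : List (String × String)) (e : String × String) :
    pvTargets (es ++ [e]) =
      if e.2 ∈ pvTargets es then pvTargets es else pvTargets es ++ [e.2] := by
  rw [pvTargets, List.foldl_append]
  show (if (pvTargets es).contains e.2 then pvTargets es else pvTargets es ++ [e.2]) = _
  by_cases h : e.2 ∈ pvTargets es <;> simp [h]

lemma pvTargets_mem (es : List (String × String)) :
    ∀ t, t ∈ pvTargets es ↔ ∃ p ∈ es, p.2 = t := by
  induction es using List.reverseRecOn with
  | nil => intro t; simp [pvTargets]
  | append_singleton es e ih =>
    intro t
    rw [pvTargets_append]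
    by_cases h : e.2 ∈ pvTargets es
    · rw [if_pos h, ih t]
      constructor
      · rintro ⟨p, hp, hpt⟩; exact ⟨p, List.mem_append_left _ hp, hpt⟩
      · rintro ⟨p, hp, hpt⟩
        rcases List.mem_append.mp hp with h1 | h1
        · exact ⟨p, h1, hpt⟩
        · have hpe : p = e := List.mem_singleton.mp h1
          subst hpe; subst hpt
          exact (ih p.2).mp h
    · rw [if_neg h]
      constructor
      · intro hm
        rcases List.mem_append.mp hm with h1 | h1
        · obtain ⟨p, hp, hpt⟩ := (ih t).mp h1
          exact ⟨p, List.mem_append_left _ hp, hpt⟩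
        · have : t = e.2 := List.mem_singleton.mp h1
          exact ⟨e, List.mem_append_right _ (by simp), this.symm⟩
      · rintro ⟨p, hp, hpt⟩
        rcases List.mem_append.mp hp with h1 | h1
        · exact List.mem_append_left _ ((ih t).mpr ⟨p, h1, hpt⟩)
        · have hpe : p = e := List.mem_singleton.mp h1
          subst hpe; subst hpt
          exact List.mem_append_right _ (by simp)

lemma pvTargets_nodup (es : List (String × String)) : (pvTargets es).Nodup := by
  induction es using List.reverseRecOn with
  | nil => simp [pvTargets]
  | append_singleton es e ih =>
    rw [pvTargets_append]
    by_cases h : e.2 ∈ pvTargets es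
    · rw [if_pos h]; exact ih
    · rw [if_neg h]
      refine List.Nodup.append ih (by simp) ?_
      intro x hx hx'
      have : x = e.2 := List.mem_singleton.mp hx'
      subst this
      exact h hx

-- Main invariant: A's fold from empty, characterized over pvTargets/countP/filter.
lemma pv_main (es : List (String × String)) :
    (es.foldl pvStepA (PySem.Dict.empty, PySem.Dict.empty)).1.items
      = (pvTargets es).map (fun t => (t, (es.countP (fun e => e.2 == t) : Int))) ∧
    (es.foldl pvStepA (PySem.Dict.empty, PySem.Dict.empty)).2.items
      = (pvTargets es).map (fun t => (t, es.filter (fun e => e.2 == t))) := by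
  induction es using List.reverseRecOn with
  | nil => constructor <;> rfl
  | append_singleton es e ih =>
    obtain ⟨h1, h2⟩ := ih
    set F := es.foldl pvStepA (PySem.Dict.empty, PySem.Dict.empty) with hF
    have hfold : (es ++ [e]).foldl pvStepA (PySem.Dict.empty, PySem.Dict.empty) = pvStepA F e := by
      rw [List.foldl_append]; rfl
    have hkeys1 : F.1.keys = pvTargets es := by
      simp only [PySem.Dict.keys, h1, List.map_map]
      exact (List.map_congr_left fun t _ => rfl).trans (List.map_id _)
    have hkeys2 : F.2.keys = pvTargets es := by
      simp only [PySem.Dict.keys, h2, List.map_map]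
      exact (List.map_congr_left fun t _ => rfl).trans (List.map_id _)
    have hnd1 : F.1.keys.Nodup := by rw [hkeys1]; exact pvTargets_nodup es
    have hnd2 : F.2.keys.Nodup := by rw [hkeys2]; exact pvTargets_nodup es
    by_cases hc : e.2 ∈ pvTargets es
    · -- existing target
      have hc1 : F.1.contains e.2 = true := by
        rw [PySem.Dict.contains_eq_decide_mem_keys, hkeys1]; simpa using hc
      have hc2 : F.2.contains e.2 = true := by
        rw [PySem.Dict.contains_eq_decide_mem_keys, hkeys2]; simpa using hc
      have hgd1 : F.1.getD e.2 0 = (es.countP (fun p => p.2 == e.2) : Int) := by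
        apply PySem.Dict.getD_of_mem_items F.1 _ hnd1
        rw [h1]; exact List.mem_map.mpr ⟨e.2, hc, rfl⟩
      have hgd2 : F.2.getD e.2 [] = es.filter (fun p => p.2 == e.2) := by
        apply PySem.Dict.getD_of_mem_items F.2 _ hnd2
        rw [h2]; exact List.mem_map.mpr ⟨e.2, hc, rfl⟩
      have hstep : pvStepA F e
          = (F.1.insert e.2 (F.1.getD e.2 0 + 1),
             F.2.insert e.2 (F.2.getD e.2 [] ++ [(e.1, e.2)])) := by
        simp [pvStepA, hc1]
      rw [hfold, hstep, pvTargets_append, if_pos hc]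
      constructor
      · rw [PySem.Dict.items_insert_of_contains _ _ hc1, h1, List.map_map]
        apply List.map_congr_left
        intro t ht
        by_cases hte : t = e.2
        · subst hte
          simp [Function.comp, hgd1, List.countP_append]
        · have hne : ¬ (e.2 = t) := fun h => hte h.symm
          simp [Function.comp, hte, List.countP_append, hne]
      · rw [PySem.Dict.items_insert_of_contains _ _ hc2, h2, List.map_map]
        apply List.map_congr_left
        intro t ht
        by_cases hte : t = e.2
        · subst hte
          simp [Function.comp, hgd2, List.filter_append]
        · have hne : ¬ (e.2 = t) := fun h => hte h.symm
          simp [Function.comp, hte, List.filter_append, hne]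
    · -- new target
      have hc1 : F.1.contains e.2 = false := by
        rw [PySem.Dict.contains_eq_decide_mem_keys, hkeys1]; simpa using hc
      have hc2 : F.2.contains e.2 = false := by
        rw [PySem.Dict.contains_eq_decide_mem_keys, hkeys2]; simpa using hc
      have hcount0 : es.countP (fun p => p.2 == e.2) = 0 := by
        rw [List.countP_eq_zero]
        intro p hp hpe
        exact hc ((pvTargets_mem es e.2).mpr ⟨p, hp, by simpa using hpe⟩)
      have hfilt0 : es.filter (fun p => p.2 == e.2) = [] := by
        rw [List.filter_eq_nil_iff]
        intro p hp hpe
        exact hc ((pvTargets_mem es e.2).mpr ⟨p, hp, by simpa using hpe⟩)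
      have hstep : pvStepA F e = (F.1.insert e.2 1, F.2.insert e.2 [(e.1, e.2)]) := by
        simp [pvStepA, hc1]
      rw [hfold, hstep, pvTargets_append, if_neg hc]
      constructor
      · rw [PySem.Dict.items_insert_of_not_contains _ _ hc1, h1, List.map_append]
        congr 1
        · apply List.map_congr_left
          intro t ht
          have hne : ¬ (e.2 = t) := fun h => hc (h ▸ ht)
          simp [List.countP_append, hne]
        · simp [List.countP_append, hcount0]
      · rw [PySem.Dict.items_insert_of_not_contains _ _ hc2, h2, List.map_append]
        congr 1
        · apply List.map_congr_left
          intro t ht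
          have hne : ¬ (e.2 = t) := fun h => hc (h ▸ ht)
          simp [List.filter_append, hne]
        · simp [List.filter_append, hfilt0]

-- ===== VERDICT =====
theorem compute_force_and_links_spec : Claim_equal_compute_force_and_links := by
  intro L _
  unfold Spec_compute_force_and_links compute_force_and_links compute_force_and_links_alt
  obtain ⟨h1, h2⟩ := pv_main L
  simp only []
  rw [h1, h2]
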